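-- pv_equiv track=rewrite | github.com/AlexFedorov228/Lab8 | lab_2_2.py | parse_level_2
-- ===== SOURCE A (Python) =====
-- from enum import Enum, auto
--
-- class State(Enum):
--     S0 = auto() # Початковий стан
--     S1 = auto() # Стан після '$' (очікуємо A-F, \d або \W)
--     S2 = auto() # Стан всередині послідовності [A-F]+
--     S3 = auto() # Фінальний стан (всередині \W+)
--     SF = auto() # Стан помилки (Fail)
--
-- def parse_level_2(text: str) -> bool:
--     """
--     Описує синтаксичний аналізатор на основі скінченного автомата,
--     реалізованого за допомогою 'switch' (if/elif/else в Python). [cite: 12]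
--     """
--
--     # Граф скінченного автомату (для звіту)[cite: 11]:
--     #
--     # (S0) --'$'--> (S1)
--     #
--     # (S1) --'\d'--> (S1)
--     # (S1) --'[A-F]'--> (S2)
--     # (S1) --'\W'--> [S3] (де \W не '$')
--     # (S1) --'$'--> [S3]
--     #
--     # (S2) --'[A-F]'--> (S2)
--     # (S2) --'\d'--> (S1)
--     # (S2) --'\W'--> [S3] (де \W не '$')
--     # (S2) --'$'--> [S3]
--     #
--     # [S3] --'\W'--> [S3]
--     #
--     # Будь-який інший символ з будь-якого стану веде в (SF).
--     # [S3] - фінальний стан.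
--
--     current_state = State.S0
--
--     for char in text:
--         # Емуляція 'switch' по поточному стану
--         if current_state == State.S0:
--             if char == '$':
--                 current_state = State.S1
--             else:
--                 current_state = State.SF # Не '$' на початку - помилка
--
--         elif current_state == State.S1:
--             if char.isdigit():
--                 current_state = State.S1
--             elif 'A' <= char <= 'F':
--                 current_state = State.S2
--             elif not char.isalnum(): # \W (будь-який не-alpha-numeric)
--                 current_state = State.S3
--             else:
--                 current_state = State.SF # Інші символи (a-z, G-Z і т.д.)
--
--         elif current_state == State.S2:
--             if 'A' <= char <= 'F':
--                 current_state = State.S2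
--             elif char.isdigit():
--                 current_state = State.S1
--             elif not char.isalnum(): # \W
--                 current_state = State.S3
--             else:
--                 current_state = State.SF
--
--         elif current_state == State.S3:
--             if not char.isalnum(): # \W
--                 current_state = State.S3
--             else:
--                 current_state = State.SF # Почався буквенно-цифровий символ
--
--         elif current_state == State.SF:
--             break # Якщо ми в стані помилки, далі перевіряти немає сенсу
--
--     # Слово правильне, ТІЛЬКИ ЯКЩО автомат завершив роботу
--     # у фінальному стані (S3).
--     return current_state == State.S3
-- ===== SOURCE B (Python) =====
-- def parse_level_2(text: str) -> bool:
--     # Two-phase scan instead of a State-enum FSM: guard the leading dollar sign, skip the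
--     # hex-digit run, then require a non-empty all-non-alnum suffix.
--     if not text or text[0] != '$':
--         return False
--     i, n = 1, len(text)
--     while i < n and (text[i].isdigit() or 'A' <= text[i] <= 'F'):
--         i += 1
--     return i < n and all(not c.isalnum() for c in text[i:])
-- ===== Notes on version B (the rewrite author's own statement) =====
-- stated objective: simpler
-- what changed: Replaces the five-state Enum FSM loop with a two-phase scan: a dollar-sign guard, an index advanced over the digit/A-F run, and an all() check that the remaining suffix is non-empty and non-alphanumeric.
import Mathlib
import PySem

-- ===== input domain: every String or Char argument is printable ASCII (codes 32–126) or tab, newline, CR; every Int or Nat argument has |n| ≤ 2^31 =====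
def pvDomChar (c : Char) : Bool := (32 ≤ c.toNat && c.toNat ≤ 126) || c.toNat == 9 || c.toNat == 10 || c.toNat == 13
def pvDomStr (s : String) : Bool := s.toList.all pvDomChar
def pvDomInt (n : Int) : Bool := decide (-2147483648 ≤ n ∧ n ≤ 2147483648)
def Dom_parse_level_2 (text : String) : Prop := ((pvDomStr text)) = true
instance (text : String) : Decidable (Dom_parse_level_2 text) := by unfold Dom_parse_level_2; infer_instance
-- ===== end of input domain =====

-- B replaces A's five-state Enum FSM with a dollar-sign guard, a scan past the digit/A-F
-- run, and a non-empty all-non-alnum suffix check (simpler decomposition, same cost).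

-- ===== PORT A =====
inductive PvState | S0 | S1 | S2 | S3 | SF
deriving DecidableEq, Repr

-- one step of A's if/elif 'switch' over the current state (SF's 'break' = SF stays SF)
def pvStep (s : PvState) (c : Char) : PvState :=
  match s with
  | .S0 => if c = '$' then .S1 else .SF
  | .S1 =>
      if PySem.Chars.isdigit c then .S1
      else if 'A' ≤ c && c ≤ 'F' then .S2
      else if !(PySem.Chars.isalnum c) then .S3
      else .SF
  | .S2 =>
      if 'A' ≤ c && c ≤ 'F' then .S2
      else if PySem.Chars.isdigit c then .S1
      else if !(PySem.Chars.isalnum c) then .S3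
      else .SF
  | .S3 => if !(PySem.Chars.isalnum c) then .S3 else .SF
  | .SF => .SF

def parse_level_2 (text : String) : Bool :=
  decide (text.toList.foldl pvStep PvState.S0 = PvState.S3)

-- ===== PORT B =====
-- the while-loop of Source B: skip the leading digit / 'A'..'F' run, return the suffix
def pvSkipHex : List Char → List Char
  | [] => []
  | c :: rest =>
      if PySem.Chars.isdigit c || ('A' ≤ c && c ≤ 'F') then pvSkipHex rest
      else c :: rest

def parse_level_2_alt (text : String) : Bool :=
  match text.toList with
  | [] => false
  | c :: rest =>
      if c ≠ '$' then false
      else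
        let r := pvSkipHex rest
        !r.isEmpty && r.all (fun ch => !(PySem.Chars.isalnum ch))

-- ===== PRECONDITION & SPEC =====
def Spec_parse_level_2 (text : String) (out : Bool) : Prop := out = parse_level_2_alt text
instance (text : String) (out : Bool) : Decidable (Spec_parse_level_2 text out) := by unfold Spec_parse_level_2; infer_instance

-- ===== CLAIM (what is proved, stated in full; the proofs are below) =====
def Claim_equal_parse_level_2 : Prop := ∀ (text : String), Dom_parse_level_2 text → Spec_parse_level_2 text (parse_level_2 text)

-- ===== LEMMAS AND PROOFS =====

theorem pvFold_SF (l : List Char) : l.foldl pvStep PvState.SF = PvState.SF := by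
  induction l with
  | nil => rfl
  | cons c rest ih => simpa [pvStep] using ih

theorem pvFold_S3 (l : List Char) :
    decide (l.foldl pvStep PvState.S3 = PvState.S3)
      = l.all (fun ch => !(PySem.Chars.isalnum ch)) := by
  induction l with
  | nil => rfl
  | cons c rest ih =>
      by_cases h : PySem.Chars.isalnum c
      · simp [pvStep, h, pvFold_SF]
      · simp [pvStep, h, ih]

-- core invariant: from S1 or S2, the FSM accepts the remaining characters
-- exactly when B's suffix check accepts them
theorem pvFold_S12 (l : List Char) :
    (decide (l.foldl pvStep PvState.S1 = PvState.S3)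
        = (let r := pvSkipHex l; !r.isEmpty && r.all (fun ch => !(PySem.Chars.isalnum ch))))
  ∧ (decide (l.foldl pvStep PvState.S2 = PvState.S3)
        = (let r := pvSkipHex l; !r.isEmpty && r.all (fun ch => !(PySem.Chars.isalnum ch)))) := by
  induction l with
  | nil => exact ⟨rfl, rfl⟩
  | cons c rest ih =>
      by_cases hd : PySem.Chars.isdigit c
      · constructor
        · simpa [pvStep, pvSkipHex, hd] using ih.1
        · by_cases hf : ('A' ≤ c && c ≤ 'F') = true
          · simpa [pvStep, pvSkipHex, hd, hf] using ih.2
          · simpa [pvStep, pvSkipHex, hd, hf] using ih.1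
      · by_cases hf : ('A' ≤ c && c ≤ 'F') = true
        · exact ⟨by simpa [pvStep, pvSkipHex, hd, hf] using ih.2,
                 by simpa [pvStep, pvSkipHex, hd, hf] using ih.2⟩
        · by_cases ha : PySem.Chars.isalnum c
          · constructor <;> simp [pvStep, pvSkipHex, hd, hf, ha, pvFold_SF]
          · constructor <;> simp [pvStep, pvSkipHex, hd, hf, ha, pvFold_S3]

-- ===== VERDICT (by name: the statement is the Claim_ definition above) =====
theorem parse_level_2_spec : Claim_equal_parse_level_2 := by
  intro text _
  unfold Spec_parse_level_2 parse_level_2 parse_level_2_alt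
  cases h : text.toList with
  | nil => simp
  | cons c rest =>
      by_cases hc : c = '$'
      · simpa [h, hc, pvStep] using (pvFold_S12 rest).1
      · simp [hc, pvStep, pvFold_SF]
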